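-- pv_equiv track=rewrite | github.com/angwz/DomainRouter | script/domain_router.py | sort_classical_items
-- ===== SOURCE A (Python) =====
-- def sort_classical_items(items):
--     """
--     排序经典规则项目，并统计每种规则的数量。
--
--     参数：
--         items (list): 经典规则列表。
--
--     返回：
--         tuple: (排序后的列表, 统计计数)。
--     """
--     # 定义规则的排序顺序
--     order = {
--         "DOMAIN-KEYWORD": 0,
--         "DOMAIN-REGEX": 1,
--         "GEOSITE": 2,
--         "IP-SUFFIX": 3,
--         "IP-ASN": 4,
--         "GEOIP": 5,
--         "SRC-GEOIP": 6,
--         "SCR-IP-ASN": 7,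
--         "SRC-IP-CIDR": 8,
--         "SRC-IP-SUFFIX": 9,
--         "DST-PORT": 10,
--         "SRC-PORT": 11,
--         "IN-PORT": 12,
--         "IN-TYPE": 13,
--         "IN-USER": 14,
--         "IN-NAME": 15,
--         "PROCESS-PATH": 16,
--         "PROCESS-PATH-REGEX": 17,
--         "PROCESS-NAME": 18,
--         "PROCESS-NAME-REGEX": 19,
--         "UID": 20,
--         "NETWORK": 21,
--         "DSCP": 22,
--         "RULE-SET": 23,
--         "AND": 24,
--         "OR": 25,
--         "NOT": 26,
--         "SUB-RULE": 27,
--     }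
--
--     item_counts = {key: 0 for key in order.keys()}  # 初始化计数器
--
--     def get_order(item):
--         # 获取项目的排序顺序
--         parts = item.split(",")
--         key = parts[0].upper()
--         if key in order:
--             item_counts[key] += 1
--             return order[key]
--         return len(order)
--
--     sorted_items = sorted(items, key=get_order)  # 按顺序排序
--     # 过滤计数器中数量为 0 的项
--     item_counts = {k: v for k, v in item_counts.items() if v > 0}
--
--     return sorted_items, item_counts  # 返回排序后的列表和计数器
-- ===== SOURCE B (Python) =====
-- ORDER_KEYS = [
--     "DOMAIN-KEYWORD", "DOMAIN-REGEX", "GEOSITE", "IP-SUFFIX", "IP-ASN",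
--     "GEOIP", "SRC-GEOIP", "SCR-IP-ASN", "SRC-IP-CIDR", "SRC-IP-SUFFIX",
--     "DST-PORT", "SRC-PORT", "IN-PORT", "IN-TYPE", "IN-USER", "IN-NAME",
--     "PROCESS-PATH", "PROCESS-PATH-REGEX", "PROCESS-NAME",
--     "PROCESS-NAME-REGEX", "UID", "NETWORK", "DSCP", "RULE-SET",
--     "AND", "OR", "NOT", "SUB-RULE",
-- ]
--
--
-- def sort_classical_items(items):
--     """Bucket (counting) sort over the fixed category table: one pass
--     distributes the items into per-index buckets (stable within a bucket)
--     while tallying the category keys; concatenating the buckets in index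
--     order gives the sorted list, and the counts are read off the tally."""
--     index = {k: i for i, k in enumerate(ORDER_KEYS)}
--     other = len(ORDER_KEYS)          # bucket index for unknown categories
--     buckets = {}
--     tally = {}
--     for item in items:
--         k = item.split(",")[0].upper()
--         buckets.setdefault(index.get(k, other), []).append(item)
--         tally[k] = tally.get(k, 0) + 1
--     sorted_items = [x for i in range(other + 1) for x in buckets.get(i, [])]
--     counts = {k: tally.get(k, 0) for k in ORDER_KEYS if tally.get(k, 0) > 0}
--     return sorted_items, counts
-- ===== Notes on version B (the rewrite author's own statement) =====
-- stated objective: alternative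
-- what changed: B replaces A's comparison sort with a repeatedly-invoked key function and an in-key-function counter by a single-pass bucket (counting) distribution over the fixed 29-category table plus a key tally: the sorted list is the concatenation of the buckets in index order and the counts are read off the tally.
import Mathlib
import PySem

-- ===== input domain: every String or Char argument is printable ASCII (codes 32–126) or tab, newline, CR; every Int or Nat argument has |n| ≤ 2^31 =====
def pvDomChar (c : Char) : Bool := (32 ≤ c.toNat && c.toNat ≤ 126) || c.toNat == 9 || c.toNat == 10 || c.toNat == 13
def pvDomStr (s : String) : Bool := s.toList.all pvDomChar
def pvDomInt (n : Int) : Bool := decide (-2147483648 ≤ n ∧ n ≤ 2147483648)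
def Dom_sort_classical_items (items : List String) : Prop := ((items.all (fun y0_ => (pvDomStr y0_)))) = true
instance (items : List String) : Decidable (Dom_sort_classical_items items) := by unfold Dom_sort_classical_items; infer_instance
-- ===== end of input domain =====

-- B replaces the comparison sort keyed through the category table by a one-pass
-- bucket distribution over the fixed categories plus a key tally (objective: alternative).

-- `item.split(",")[0].upper()` — the category key of a rule item; this exact expression
-- occurs in both Pythons.  `","` is a nonempty separator, so `split?` is always `some`
-- of a nonempty list and `parts[0]` is its element 0 (exact, no IndexError possible).
def pvRuleKey (item : String) : String :=
  PySem.Str.upper (((PySem.Str.split? item ",").getD []).getD 0 "")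

-- ===== PORT A =====
-- A's literal `order` table, in source order.
def pvOrderPairs : List (String × Int) :=
  [("DOMAIN-KEYWORD", 0), ("DOMAIN-REGEX", 1), ("GEOSITE", 2), ("IP-SUFFIX", 3),
   ("IP-ASN", 4), ("GEOIP", 5), ("SRC-GEOIP", 6), ("SCR-IP-ASN", 7),
   ("SRC-IP-CIDR", 8), ("SRC-IP-SUFFIX", 9), ("DST-PORT", 10), ("SRC-PORT", 11),
   ("IN-PORT", 12), ("IN-TYPE", 13), ("IN-USER", 14), ("IN-NAME", 15),
   ("PROCESS-PATH", 16), ("PROCESS-PATH-REGEX", 17), ("PROCESS-NAME", 18),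
   ("PROCESS-NAME-REGEX", 19), ("UID", 20), ("NETWORK", 21), ("DSCP", 22),
   ("RULE-SET", 23), ("AND", 24), ("OR", 25), ("NOT", 26), ("SUB-RULE", 27)]

def pvOrder : PySem.Dict String Int := PySem.Dict.ofList pvOrderPairs

-- A's `get_order` both returns the sort key and increments `item_counts`; CPython's
-- `sorted` calls the key function once per element in list order, so the port computes
-- the (call-order-independent) counter by a fold over `items` and uses the pure key
-- `order.get(key, len(order))` for the sort (len(order) = 28).
def sort_classical_items (items : List String) : List String × (List (String × Int)) :=
  let counts0 : PySem.Dict String Int :=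
    PySem.Dict.ofList (pvOrder.keys.map (fun k => (k, 0)))      -- {key: 0 for key in order}
  let counts := items.foldl (fun d it =>
    let k := pvRuleKey it
    if pvOrder.contains k then d.modify k 0 (· + 1) else d) counts0
  let sortedItems := PySem.List.sorted items (fun it => (pvOrder.get? (pvRuleKey it)).getD 28)
  (sortedItems, counts.items.filter (fun p => decide (0 < p.2)))  -- {k: v for ... if v > 0}

-- ===== PORT B =====
def pvCats : List String :=
  ["DOMAIN-KEYWORD", "DOMAIN-REGEX", "GEOSITE", "IP-SUFFIX", "IP-ASN",
   "GEOIP", "SRC-GEOIP", "SCR-IP-ASN", "SRC-IP-CIDR", "SRC-IP-SUFFIX",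
   "DST-PORT", "SRC-PORT", "IN-PORT", "IN-TYPE", "IN-USER", "IN-NAME",
   "PROCESS-PATH", "PROCESS-PATH-REGEX", "PROCESS-NAME",
   "PROCESS-NAME-REGEX", "UID", "NETWORK", "DSCP", "RULE-SET",
   "AND", "OR", "NOT", "SUB-RULE"]

-- {k: i for i, k in enumerate(ORDER_KEYS)}
def pvIndex : PySem.Dict String Int :=
  PySem.Dict.ofList ((PySem.List.enumerate pvCats).map (fun p => (p.2, p.1)))

def sort_classical_items_alt (items : List String) : List String × (List (String × Int)) :=
  let other : Int := (pvCats.length : Int)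
  -- one pass: buckets.setdefault(index.get(k, other), []).append(item)  [≡ modify i [] (· ++ [item])]
  --           tally[k] = tally.get(k, 0) + 1                            [≡ modify k 0 (· + 1)]
  let st := items.foldl (fun s it =>
      let k := pvRuleKey it
      (s.1.modify ((pvIndex.get? k).getD other) [] (· ++ [it]),
       s.2.modify k 0 (· + 1)))
    ((PySem.Dict.empty : PySem.Dict Int (List String)), (PySem.Dict.empty : PySem.Dict String Int))
  -- [x for i in range(other + 1) for x in buckets.get(i, [])]
  let sortedItems := (PySem.List.pyRange 0 (other + 1)).foldl (fun acc i => acc ++ st.1.getD i []) []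
  -- {k: tally.get(k, 0) for k in ORDER_KEYS if tally.get(k, 0) > 0}
  let counts := pvCats.foldl (fun acc k =>
      if decide (0 < st.2.getD k 0) then acc ++ [(k, st.2.getD k 0)] else acc) []
  (sortedItems, counts)

-- ===== PRECONDITION & SPEC =====
def Spec_sort_classical_items (items : List String) (out : List String × (List (String × Int))) : Prop := out = sort_classical_items_alt items
instance (items : List String) (out : List String × (List (String × Int))) : Decidable (Spec_sort_classical_items items out) := by unfold Spec_sort_classical_items; infer_instance

-- ===== CLAIM (what is proved, stated in full; the proofs are below) =====
def Claim_equal_sort_classical_items : Prop := ∀ (items : List String), Dom_sort_classical_items items → Spec_sort_classical_items items (sort_classical_items items)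

-- ===== LEMMAS AND PROOFS =====

-- the common sort key / bucket index of an item
def pvKeyIdx (it : String) : Int := (pvOrder.get? (pvRuleKey it)).getD 28

theorem pvIndex_eq : pvIndex = pvOrder := by decide

theorem pvKeyIdx_bounds (it : String) : 0 ≤ pvKeyIdx it ∧ pvKeyIdx it < 29 := by
  unfold pvKeyIdx
  cases h : pvOrder.get? (pvRuleKey it) with
  | none => simp [Option.getD]
  | some v =>
    have hmem : (pvRuleKey it, v) ∈ pvOrder.items :=
      (PySem.Dict.get?_eq_some_iff_mem_items pvOrder _ v (by decide)).mp h
    have hall : pvOrder.items.all (fun p => decide (0 ≤ p.2 ∧ p.2 < 29)) = true := by decide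
    have := (List.all_eq_true.mp hall) _ hmem
    simp at this
    simpa using this

-- stable insertion puts x after every element it is not strictly below, before the rest
theorem insertBy_middle (key : String → Int) (x : String) (ys zs : List String)
    (h1 : ∀ y ∈ ys, ¬ key x < key y) (h2 : ∀ z ∈ zs, key x < key z) :
    PySem.List.insertBy (fun a b => decide (key a < key b)) x (ys ++ zs) = ys ++ x :: zs := by
  induction ys with
  | nil =>
    cases zs with
    | nil => simp [PySem.List.insertBy]
    | cons z t => simp [PySem.List.insertBy, h2 z (by simp)]
  | cons y t ih =>
    have hy : ¬ key x < key y := h1 y (by simp)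
    simp only [List.cons_append, PySem.List.insertBy, decide_eq_true_eq, if_neg hy]
    simp [ih (fun y hy => h1 y (by simp [hy]))]

theorem flatMap_congr_mem {α β : Type} (l : List α) (f g : α → List β)
    (h : ∀ a ∈ l, f a = g a) : l.flatMap f = l.flatMap g := by
  induction l with
  | nil => rfl
  | cons a t ih => simp [List.flatMap_cons, h a (by simp), ih (fun a ha => h a (by simp [ha]))]

-- bucket characterisation of Python's stable sort for a key bounded in [0, 29)
theorem bucket_sorted (key : String → Int) (hb : ∀ it, 0 ≤ key it ∧ key it < 29) (xs : List String) :
    PySem.List.sorted xs key =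
      (PySem.List.pyRange 0 29).flatMap (fun v => xs.filter (fun x => key x == v)) := by
  rw [PySem.List.sorted_eq_foldl_insertBy]
  induction xs using List.reverseRecOn with
  | nil => simp
  | append_singleton xs x ih =>
    rw [List.foldl_append, List.foldl_cons, List.foldl_nil, ih]
    have hv := hb x
    have hsplit : PySem.List.pyRange 0 29 =
        PySem.List.pyRange 0 (key x + 1) ++ PySem.List.pyRange (key x + 1) 29 :=
      PySem.List.pyRange_one_append 0 (key x + 1) 29 (by omega) (by omega)
    have hsplit2 : PySem.List.pyRange 0 (key x + 1) =
        PySem.List.pyRange 0 (key x) ++ PySem.List.pyRange (key x) (key x + 1) :=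
      PySem.List.pyRange_one_append 0 (key x) (key x + 1) (by omega) (by omega)
    have hone : PySem.List.pyRange (key x) (key x + 1) = [key x] := by
      rw [PySem.List.pyRange_one_cons (by omega)]
      simp [PySem.List.pyRange]
    -- left side: insert x after the ≤-buckets, before the >-buckets
    have hins :
        PySem.List.insertBy (fun a b => decide (key a < key b)) x
          ((PySem.List.pyRange 0 29).flatMap (fun v => xs.filter (fun y => key y == v))) =
        ((PySem.List.pyRange 0 (key x + 1)).flatMap (fun v => xs.filter (fun y => key y == v))) ++
          x :: ((PySem.List.pyRange (key x + 1) 29).flatMap (fun v => xs.filter (fun y => key y == v))) := by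
      rw [hsplit, List.flatMap_append]
      apply insertBy_middle
      · intro y hy
        rcases List.mem_flatMap.mp hy with ⟨v, hvr, hyf⟩
        have hv' := PySem.List.mem_pyRange_one.mp hvr
        have : key y == v := (List.mem_filter.mp hyf).2
        have : key y = v := by simpa using this
        omega
      · intro z hz
        rcases List.mem_flatMap.mp hz with ⟨v, hvr, hzf⟩
        have hv' := PySem.List.mem_pyRange_one.mp hvr
        have : key z == v := (List.mem_filter.mp hzf).2
        have : key z = v := by simpa using this
        omega
    have hfil : ∀ v : Int, (xs ++ [x]).filter (fun y => key y == v) =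
        xs.filter (fun y => key y == v) ++ (if key x == v then [x] else []) := by
      intro v
      rw [List.filter_append]
      cases h : (key x == v) <;> simp [List.filter, h]
    have hlow : (PySem.List.pyRange 0 (key x)).flatMap
          (fun v => (xs ++ [x]).filter (fun y => key y == v)) =
        (PySem.List.pyRange 0 (key x)).flatMap (fun v => xs.filter (fun y => key y == v)) := by
      apply flatMap_congr_mem
      intro v hvr
      have hv' := PySem.List.mem_pyRange_one.mp hvr
      rw [hfil v]
      have : (key x == v) = false := by simp; omega
      simp [this]
    have hhigh : (PySem.List.pyRange (key x + 1) 29).flatMap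
          (fun v => (xs ++ [x]).filter (fun y => key y == v)) =
        (PySem.List.pyRange (key x + 1) 29).flatMap (fun v => xs.filter (fun y => key y == v)) := by
      apply flatMap_congr_mem
      intro v hvr
      have hv' := PySem.List.mem_pyRange_one.mp hvr
      rw [hfil v]
      have : (key x == v) = false := by simp; omega
      simp [this]
    rw [hins]
    conv_rhs => rw [hsplit, hsplit2, hone]
    simp only [List.flatMap_append]
    rw [hlow, hhigh]
    have hat : [key x].flatMap (fun v => (xs ++ [x]).filter (fun y => key y == v)) =
        xs.filter (fun y => key y == key x) ++ [x] := by
      simp only [List.flatMap_cons, List.flatMap_nil, List.append_nil, hfil (key x)]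
      simp
    rw [hat]
    conv_lhs => rw [hsplit2, hone]
    simp only [List.flatMap_append, List.flatMap_cons, List.flatMap_nil, List.append_nil,
      List.append_assoc, List.cons_append]
    simp

-- count of a category over the items' keys
def pvCnt (items : List String) (c : String) : Int := ((items.map pvRuleKey).count c : Int)

set_option maxHeartbeats 1600000 in
theorem counts0_getD_zero (c : String) :
    (PySem.Dict.ofList (pvOrder.keys.map (fun k => (k, (0 : Int))))).getD c 0 = 0 := by
  set d := PySem.Dict.ofList (pvOrder.keys.map (fun k => (k, (0 : Int)))) with hd
  cases h : d.get? c with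
  | none => exact PySem.Dict.getD_of_get?_eq_none d 0 h
  | some v =>
    have hmem : (c, v) ∈ d.items := (PySem.Dict.get?_eq_some_iff_mem_items d _ v (by decide)).mp h
    have hall : d.items.all (fun p => decide (p.2 = 0)) = true := by decide
    have hv : v = 0 := by simpa using (List.all_eq_true.mp hall) _ hmem
    rw [PySem.Dict.getD_eq_get?_getD, h]; simp [hv]

-- A's counter dict lists exactly the table keys with their key-counts
set_option maxHeartbeats 1600000 in
theorem countsA_items (items : List String) :
    (items.foldl (fun d it =>
        if pvOrder.contains (pvRuleKey it) then d.modify (pvRuleKey it) 0 (· + 1) else d)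
      (PySem.Dict.ofList (pvOrder.keys.map (fun k => (k, (0 : Int)))))).items =
    pvOrder.keys.map (fun c => (c, pvCnt items c)) := by
  set d0 := PySem.Dict.ofList (pvOrder.keys.map (fun k => (k, (0 : Int)))) with hd0
  set q : String → Bool := fun it => pvOrder.contains (pvRuleKey it) with hq
  have hfold : items.foldl (fun d it =>
      if pvOrder.contains (pvRuleKey it) then d.modify (pvRuleKey it) 0 (· + 1) else d) d0 =
      (items.filter q).foldl (fun d it => d.modify (pvRuleKey it) 0 (· + 1)) d0 := by
    exact PySem.List.foldl_if_eq_foldl_filter q (fun d it => d.modify (pvRuleKey it) 0 (· + 1)) items d0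
  rw [hfold]
  set l := items.filter q with hl
  set dF := l.foldl (fun d it => d.modify (pvRuleKey it) 0 (· + 1)) d0 with hdF
  have hkeys0 : d0.keys = pvOrder.keys := by decide
  have hkeys : dF.keys = pvOrder.keys := by
    rw [hdF]
    rw [PySem.Dict.keys_foldl_modify_key l pvRuleKey 0 (fun _ _ => (· + 1)) d0]
    rw [PySem.Set.update_eq_append_filter]
    have : (PySem.Set.ofList (l.map pvRuleKey)).filter (fun y => !(PySem.Set.contains d0.keys y)) = [] := by
      rw [List.filter_eq_nil_iff]
      intro k hk
      have hk' : k ∈ l.map pvRuleKey := (PySem.Set.mem_ofList _ _).mp hk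
      rcases List.mem_map.mp hk' with ⟨it, hit, rfl⟩
      have hqit : q it = true := (List.mem_filter.mp hit).2
      have hmemk : pvRuleKey it ∈ d0.keys := by
        rw [hkeys0]; exact (PySem.Dict.contains_iff_mem_keys _ _).mp hqit
      simpa using hmemk
    rw [this, List.append_nil, hkeys0]
  have hnodup : dF.keys.Nodup := by rw [hkeys]; decide
  rw [PySem.Dict.items_eq_map_keys dF hnodup 0, hkeys]
  apply List.map_congr_left
  intro c hc
  congr 1
  -- dF.getD c 0 = pvCnt items c
  have hgd : dF.getD c 0 = d0.getD c 0 + ((l.map pvRuleKey).count c : Int) := by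
    have h := PySem.Dict.getD_foldl_modify_add_one (l.map pvRuleKey) d0 c
    rw [List.foldl_map] at h
    rw [hdF]; exact h
  rw [hgd, counts0_getD_zero, zero_add]
  unfold pvCnt
  congr 1
  -- count over filtered keys = count over all keys, for c a table key
  rw [hl, List.count_eq_countP, List.count_eq_countP, List.countP_map, List.countP_filter,
    List.countP_map]
  apply List.countP_congr
  intro it _
  simp only [Function.comp_apply]
  by_cases h : pvRuleKey it = c
  · have hqt : q it = true := by
      rw [hq]
      simp only [h]
      exact (PySem.Dict.contains_iff_mem_keys _ _).mpr hc
    simp [h, hqt]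
  · simp [h]

-- ===== VERDICT (by name: the statement is the Claim_ definition above) =====
theorem bucketsB_getD (items : List String) (i : Int) :
    (items.foldl (fun d it =>
        d.modify ((pvOrder.get? (pvRuleKey it)).getD 28) [] (· ++ [it]))
      (PySem.Dict.empty : PySem.Dict Int (List String))).getD i [] =
    items.filter (fun it => (pvOrder.get? (pvRuleKey it)).getD 28 == i) := by
  have h := PySem.Dict.getD_foldl_modify_append
    (items.map (fun it => ((pvOrder.get? (pvRuleKey it)).getD 28, it)))
    (PySem.Dict.empty : PySem.Dict Int (List String)) i
  rw [List.foldl_map] at h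
  rw [h, PySem.Dict.getD_empty, List.nil_append, List.filter_map, List.map_map]
  have hid : ((fun (x : Int × String) => x.2) ∘
      fun it => ((pvOrder.get? (pvRuleKey it)).getD 28, it)) = id := rfl
  rw [hid, List.map_id]
  rfl

theorem tallyB_getD (items : List String) (k : String) :
    (items.foldl (fun d it => d.modify (pvRuleKey it) 0 (· + 1))
      (PySem.Dict.empty : PySem.Dict String Int)).getD k 0 = pvCnt items k := by
  have h := PySem.Dict.getD_foldl_modify_add_one (items.map pvRuleKey)
    (PySem.Dict.empty : PySem.Dict String Int) k
  rw [List.foldl_map] at h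
  rw [h, PySem.Dict.getD_empty, zero_add]
  rfl

theorem sort_classical_items_spec : Claim_equal_sort_classical_items := by
  intro items _
  unfold Spec_sort_classical_items sort_classical_items sort_classical_items_alt
  simp only [pvIndex_eq]
  have hlen : ((pvCats.length : Int)) = 28 := by decide
  rw [hlen]
  rw [PySem.List.foldl_prod_mk
      (f := fun (d : PySem.Dict Int (List String)) it =>
        d.modify ((pvOrder.get? (pvRuleKey it)).getD 28) [] (· ++ [it]))
      (g := fun (d : PySem.Dict String Int) it => d.modify (pvRuleKey it) 0 (· + 1))]
  dsimp only
  -- sorted lists agree: stable sort = bucket concatenation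
  have h29 : (28 : Int) + 1 = 29 := by norm_num
  rw [h29, PySem.List.foldl_append_eq_flatMap, List.nil_append]
  have hsorted :
      PySem.List.sorted items (fun it => (pvOrder.get? (pvRuleKey it)).getD 28) =
      (PySem.List.pyRange 0 29).flatMap (fun i =>
        (items.foldl (fun d it =>
            d.modify ((pvOrder.get? (pvRuleKey it)).getD 28) [] (· ++ [it]))
          (PySem.Dict.empty : PySem.Dict Int (List String))).getD i []) := by
    rw [bucket_sorted (fun it => (pvOrder.get? (pvRuleKey it)).getD 28)
          (fun it => pvKeyIdx_bounds it) items]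
    exact (flatMap_congr_mem _ _ _ (fun i _ => bucketsB_getD items i)).symm
  rw [hsorted]
  -- counts agree: counter dict filtered = tally read off the table
  rw [countsA_items items, List.filter_map]
  rw [PySem.List.foldl_append_if
      (p := fun k => decide (0 < (items.foldl (fun d it => d.modify (pvRuleKey it) 0 (· + 1))
        (PySem.Dict.empty : PySem.Dict String Int)).getD k 0))
      (f := fun k => (k, (items.foldl (fun d it => d.modify (pvRuleKey it) 0 (· + 1))
        (PySem.Dict.empty : PySem.Dict String Int)).getD k 0))]
  rw [List.nil_append]
  have hkeys : pvOrder.keys = pvCats := by decide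
  rw [hkeys]
  simp only [tallyB_getD]
  rfl
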